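-- pv_equiv track=rewrite | github.com/mnichol3/AdventOfCode2024 | day2.py | part_1
-- ===== SOURCE A (Python) =====
-- def part_1(report: list[list[int]]) -> int:
--     """Part 1 Solution.
--
--     Parameters
--     ----------
--     report: list of list of int
--
--     Returns
--     -------
--     int
--     """
--     num_safe = 0
--
--     for x in report:
--         num_pos = 0
--         num_in_range = 0
--
--         diff = [x[i+1] - x[i] for i in range(len(x) - 1)]
--
--         for z in diff:
--             if z > 0:
--                 num_pos += 1
--
--             if 1 <= abs(z) <= 3:
--                 num_in_range += 1
--
--         if (
--             num_in_range == len(diff) and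
--             (num_pos == 0 or num_pos == len(diff))
--         ):
--             num_safe += 1
--
--     return num_safe
-- ===== SOURCE B (Python) =====
-- def part_1(report: list[list[int]]) -> int:
--     """Part 1: count safe reports (monotonic with adjacent steps of 1..3)."""
--     def is_safe(x):
--         monotone = x == sorted(x) or x == sorted(x, reverse=True)
--         steps_ok = all(1 <= abs(b - a) <= 3 for a, b in zip(x, x[1:]))
--         return monotone and steps_ok
--     return sum(is_safe(x) for x in report)
-- ===== Notes on version B (the rewrite author's own statement) =====
-- stated objective: simpler
-- what changed: Replaces A's per-row counting of positive and in-range diffs compared against the diff-list length with a direct is_safe predicate: monotonicity tested by comparing the row to its sorted/reverse-sorted forms, plus an all() step-range check over zipped adjacent pairs, summed over rows.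
import Mathlib
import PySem

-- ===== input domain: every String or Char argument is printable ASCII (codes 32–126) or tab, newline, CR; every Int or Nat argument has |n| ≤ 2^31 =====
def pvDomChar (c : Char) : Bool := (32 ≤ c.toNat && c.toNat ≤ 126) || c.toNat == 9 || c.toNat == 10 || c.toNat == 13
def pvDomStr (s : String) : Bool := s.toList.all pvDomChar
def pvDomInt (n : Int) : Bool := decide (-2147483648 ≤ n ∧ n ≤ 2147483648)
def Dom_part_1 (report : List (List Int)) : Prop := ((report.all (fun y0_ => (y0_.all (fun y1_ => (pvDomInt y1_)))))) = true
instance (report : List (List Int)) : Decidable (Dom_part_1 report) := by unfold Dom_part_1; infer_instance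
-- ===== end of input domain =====

-- B replaces A's count-positives / count-in-range bookkeeping by a direct is_safe
-- predicate (sorted-equality monotonicity test + all-steps-in-range check), summed
-- over the rows; objective: simpler.

-- ===== PORT A =====
-- diff = [x[i+1] - x[i] for i in range(len(x) - 1)]
def pvDiffA (x : List Int) : List Int :=
  (PySem.List.pyRange 0 ((x.length : Int) - 1) 1).map
    (fun i => PySem.List.pyGetD x (i + 1) 0 - PySem.List.pyGetD x i 0)

def part_1 (report : List (List Int)) : Int :=
  report.foldl
    (fun num_safe x =>
      let diff := pvDiffA x
      let c :=
        diff.foldl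
          (fun (c : Int × Int) z =>
            (if z > 0 then c.1 + 1 else c.1,
             if 1 ≤ |z| ∧ |z| ≤ 3 then c.2 + 1 else c.2))
          (0, 0)
      if c.2 = (diff.length : Int) ∧ (c.1 = 0 ∨ c.1 = (diff.length : Int)) then
        num_safe + 1
      else num_safe)
    0

-- ===== PORT B =====
def pvIsSafe (x : List Int) : Bool :=
  ((x == PySem.List.sorted x (fun v => v) false) ||
   (x == PySem.List.sorted x (fun v => v) true)) &&
  (x.zip (PySem.List.slice x (some 1) none)).all
    (fun p => decide (1 ≤ |p.2 - p.1| ∧ |p.2 - p.1| ≤ 3))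

def part_1_alt (report : List (List Int)) : Int :=
  (report.map (fun x => if pvIsSafe x then (1 : Int) else 0)).sum

-- ===== PRECONDITION & SPEC =====
def Spec_part_1 (report : List (List Int)) (out : Int) : Prop := out = part_1_alt report
instance (report : List (List Int)) (out : Int) : Decidable (Spec_part_1 report out) := by unfold Spec_part_1; infer_instance

-- ===== CLAIM (what is proved, stated in full; the proofs are below) =====
def Claim_equal_part_1 : Prop := ∀ (report : List (List Int)), Dom_part_1 report → Spec_part_1 report (part_1 report)

-- ===== LEMMAS AND PROOFS =====

-- A's diff list is the adjacent-pair differences.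
theorem pvDiffA_eq (x : List Int) :
    pvDiffA x = (x.zip x.tail).map (fun p => p.2 - p.1) := by
  apply List.ext_getElem
  · simp only [pvDiffA, List.length_map, PySem.List.length_pyRange_one,
      List.length_zip, List.length_tail]
    omega
  · intro k h1 h2
    have hk : k < x.length - 1 := by
      simpa [pvDiffA, PySem.List.length_pyRange_one] using h1
    simp only [pvDiffA, List.getElem_map, PySem.List.getElem_pyRange_one,
      List.getElem_zip, List.getElem_tail]
    have h1 : PySem.List.pyGetD x ((0 : Int) + (k : Int) + 1) 0 = x[k + 1] := by
      rw [show (0 : Int) + (k : Int) + 1 = ((k + 1 : Nat) : Int) by push_cast; ring]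
      rw [PySem.List.pyGetD_natCast]
      exact List.getD_eq_getElem _ _ (by omega)
    have h0 : PySem.List.pyGetD x ((0 : Int) + (k : Int)) 0 = x[k] := by
      rw [show (0 : Int) + (k : Int) = ((k : Nat) : Int) by ring]
      rw [PySem.List.pyGetD_natCast]
      exact List.getD_eq_getElem _ _ (by omega)
    rw [h1, h0]

-- the inner counting fold computes the two countP's
theorem pvFold_count (l : List Int) (p q : Int) :
    l.foldl
      (fun (c : Int × Int) z =>
        (if z > 0 then c.1 + 1 else c.1,
         if 1 ≤ |z| ∧ |z| ≤ 3 then c.2 + 1 else c.2)) (p, q)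
    = (p + (l.countP (fun z => decide (z > 0)) : Int),
       q + (l.countP (fun z => decide (1 ≤ |z| ∧ |z| ≤ 3)) : Int)) := by
  induction l generalizing p q with
  | nil => simp
  | cons a t ih =>
    simp only [List.foldl_cons, List.countP_cons, ih, decide_eq_true_eq, Prod.mk.injEq]
    constructor <;> split_ifs <;> push_cast <;> ring_nf

-- adjacent-pair condition ↔ Pairwise, for a transitive relation
theorem pvAdj_of_pairwise {r : Int → Int → Prop} :
    ∀ x : List Int, x.Pairwise r → ∀ p ∈ x.zip x.tail, r p.1 p.2 := by
  intro x
  induction x with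
  | nil => simp
  | cons a t ih =>
    intro hp
    cases t with
    | nil => simp
    | cons b t' =>
      simp only [List.tail_cons, List.zip_cons_cons, List.mem_cons]
      rintro p (rfl | hmem)
      · exact (List.pairwise_cons.1 hp).1 b (by simp)
      · exact ih (List.pairwise_cons.1 hp).2 p hmem

theorem pvHead_rel {r : Int → Int → Prop} (ht : ∀ a b c, r a b → r b c → r a c) :
    ∀ (t : List Int) (a : Int), (∀ p ∈ (a :: t).zip t, r p.1 p.2) → ∀ y ∈ t, r a y := by
  intro t
  induction t with
  | nil => simp
  | cons b t' ih =>
    intro a h y hy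
    have hab : r a b := h (a, b) (by simp)
    rcases List.mem_cons.1 hy with rfl | hy'
    · exact hab
    · exact ht a b y hab (ih b (fun p hp => h p (by simp [hp])) y hy')

theorem pvPairwise_of_adj {r : Int → Int → Prop} (ht : ∀ a b c, r a b → r b c → r a c) :
    ∀ x : List Int, (∀ p ∈ x.zip x.tail, r p.1 p.2) → x.Pairwise r := by
  intro x
  induction x with
  | nil => simp
  | cons a t ih =>
    intro h
    refine List.pairwise_cons.2 ⟨pvHead_rel ht t a (by simpa using h), ih ?_⟩
    intro p hp
    cases t with
    | nil => simp at hp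
    | cons b t' =>
      refine h p ?_
      simp only [List.tail_cons, List.zip_cons_cons, List.mem_cons]
      right; simpa using hp

-- per-row equivalence of the two safety tests
theorem pvSafe_iff (x : List Int) :
    (((pvDiffA x).countP (fun z => decide (1 ≤ |z| ∧ |z| ≤ 3)) : Int) = ((pvDiffA x).length : Int) ∧
      (((pvDiffA x).countP (fun z => decide (z > 0)) : Int) = 0 ∨
       ((pvDiffA x).countP (fun z => decide (z > 0)) : Int) = ((pvDiffA x).length : Int)))
    ↔ pvIsSafe x = true := by
  rw [pvDiffA_eq]
  have hB : pvIsSafe x = true ↔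
      ((x = PySem.List.sorted x (fun v => v) false ∨ x = PySem.List.sorted x (fun v => v) true) ∧
        ∀ p ∈ x.zip x.tail, 1 ≤ |p.2 - p.1| ∧ |p.2 - p.1| ≤ 3) := by
    simp [pvIsSafe, PySem.List.slice_from_one]
  rw [hB]
  constructor
  · rintro ⟨hR, hdir⟩
    have hRnat : ((x.zip x.tail).map (fun p => p.2 - p.1)).countP
        (fun z => decide (1 ≤ |z| ∧ |z| ≤ 3))
        = ((x.zip x.tail).map (fun p => p.2 - p.1)).length := by exact_mod_cast hR
    have hR' : ∀ p ∈ x.zip x.tail, 1 ≤ |p.2 - p.1| ∧ |p.2 - p.1| ≤ 3 := by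
      intro p hp
      have := List.countP_eq_length.mp hRnat _ (List.mem_map_of_mem hp)
      simpa using this
    refine ⟨?_, hR'⟩
    rcases hdir with h0 | hall
    · have h0nat : ((x.zip x.tail).map (fun p => p.2 - p.1)).countP
          (fun z => decide (z > 0)) = 0 := by exact_mod_cast h0
      have h0' : ∀ p ∈ x.zip x.tail, ¬ (p.2 - p.1 > 0) := by
        intro p hp
        have := List.countP_eq_zero.mp h0nat _ (List.mem_map_of_mem hp)
        simpa using this
      right
      have hpw : x.Pairwise (fun a b : Int => b < a) :=
        pvPairwise_of_adj (r := fun a b : Int => b < a)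
          (fun a b c hab hbc => lt_trans hbc hab) x
          (fun p hp => by
            have h1 := h0' p hp
            have h2 := (hR' p hp).1
            rcases abs_cases (p.2 - p.1) with ⟨he, h4⟩ | ⟨he, h4⟩ <;> omega)
      exact (PySem.List.sorted_rev_eq_of_perm_of_pairwise_gt x x (fun v : Int => v)
        (List.Perm.refl x) hpw).symm
    · have hallnat : ((x.zip x.tail).map (fun p => p.2 - p.1)).countP
          (fun z => decide (z > 0))
          = ((x.zip x.tail).map (fun p => p.2 - p.1)).length := by exact_mod_cast hall
      have hall' : ∀ p ∈ x.zip x.tail, p.1 < p.2 := by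
        intro p hp
        have := List.countP_eq_length.mp hallnat _ (List.mem_map_of_mem hp)
        simp at this
        omega
      left
      have hpw : x.Pairwise (fun a b : Int => a < b) :=
        pvPairwise_of_adj (r := fun a b : Int => a < b)
          (fun a b c hab hbc => lt_trans hab hbc) x hall'
      exact (PySem.List.sorted_eq_of_perm_of_pairwise_lt x x (fun v : Int => v)
        (List.Perm.refl x) hpw).symm
  · rintro ⟨hmono, hR'⟩
    have hRnat : ((x.zip x.tail).map (fun p => p.2 - p.1)).countP
        (fun z => decide (1 ≤ |z| ∧ |z| ≤ 3))
        = ((x.zip x.tail).map (fun p => p.2 - p.1)).length := by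
      apply List.countP_eq_length.mpr
      intro z hz
      obtain ⟨p, hp, rfl⟩ := List.mem_map.mp hz
      simpa using hR' p hp
    refine ⟨by exact_mod_cast hRnat, ?_⟩
    rcases hmono with hasc | hdesc
    · right
      have hpw : x.Pairwise (fun a b : Int => a ≤ b) := by
        have h := PySem.List.sorted_pairwise x (fun v : Int => v)
        rw [← hasc] at h
        exact h
      have hlen : ((x.zip x.tail).map (fun p => p.2 - p.1)).countP
          (fun z => decide (z > 0))
          = ((x.zip x.tail).map (fun p => p.2 - p.1)).length := by
        apply List.countP_eq_length.mpr
        intro z hz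
        obtain ⟨p, hp, rfl⟩ := List.mem_map.mp hz
        have h1 := pvAdj_of_pairwise x hpw p hp
        have h2 := (hR' p hp).1
        simp only [decide_eq_true_eq, gt_iff_lt]
        rcases abs_cases (p.2 - p.1) with ⟨he, h4⟩ | ⟨he, h4⟩ <;> omega
      exact_mod_cast hlen
    · left
      have hpw : x.Pairwise (fun a b : Int => b ≤ a) := by
        have h := PySem.List.sorted_pairwise_rev x (fun v : Int => v)
        rw [← hdesc] at h
        exact h
      have hzero : ((x.zip x.tail).map (fun p => p.2 - p.1)).countP
          (fun z => decide (z > 0)) = 0 := by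
        apply List.countP_eq_zero.mpr
        intro z hz
        obtain ⟨p, hp, rfl⟩ := List.mem_map.mp hz
        have h1 := pvAdj_of_pairwise x hpw p hp
        simp only [decide_eq_true_eq, gt_iff_lt]
        omega
      exact_mod_cast hzero

-- fold over the report with a generalized accumulator
theorem pvFold_outer (report : List (List Int)) (acc : Int) :
    report.foldl
      (fun num_safe x =>
        let diff := pvDiffA x
        let c :=
          diff.foldl
            (fun (c : Int × Int) z =>
              (if z > 0 then c.1 + 1 else c.1,
               if 1 ≤ |z| ∧ |z| ≤ 3 then c.2 + 1 else c.2))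
            (0, 0)
        if c.2 = (diff.length : Int) ∧ (c.1 = 0 ∨ c.1 = (diff.length : Int)) then
          num_safe + 1
        else num_safe)
      acc
    = acc + part_1_alt report := by
  induction report generalizing acc with
  | nil => simp [part_1_alt]
  | cons x rest ih =>
    simp only [List.foldl_cons, ih, part_1_alt, List.map_cons, List.sum_cons]
    rw [pvFold_count]
    by_cases h : pvIsSafe x = true
    · rw [if_pos (by simpa using (pvSafe_iff x).2 h), if_pos h]; ring
    · rw [if_neg ?_, if_neg h]
      · ring
      · intro hc
        exact h ((pvSafe_iff x).1 (by simpa using hc))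

-- ===== VERDICT (by name: the statement is the Claim_ definition above) =====
theorem part_1_spec : Claim_equal_part_1 := by
  intro report _
  show part_1 report = part_1_alt report
  have := pvFold_outer report 0
  simpa [part_1] using this
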